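-- pv_equiv track=rewrite | github.com/casbu/Python-Projects | Puzzle-Based Password Generator/main.py | reverse_right
-- ===== SOURCE A (Python) =====
-- def get_middle_index(puzzle):
--     num_rows = len(puzzle)
--     num_cols = len(puzzle[0]) if num_rows > 0 else 0
--     middle_row_index = num_rows // 2
--     middle_col_index = num_cols // 2
--     return middle_row_index, middle_col_index
--
-- def reverse_right(puzzle):
--     middle_row_index, middle_col_index = get_middle_index(puzzle)
--
--     # establish columns to the right of the middle column
--     right_columns = []
--     for col in range(middle_col_index + 1, len(puzzle[0])):
--         column = [row[col] for row in puzzle]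
--         #reverse column vertically
--         right_columns.append(column[::-1])
--
--     # create new puzzle
--     new_puzzle = []
--     for row in range(len(puzzle)):
--         new_row = []
--         # add left columns
--         new_row.extend(puzzle[row][:middle_col_index + 1])
--         # add transformed right columns
--         for col in range(len(puzzle[0]) - (middle_col_index + 1)):
--             new_row.append(right_columns[col][row])
--
--         new_puzzle.append(new_row)
--
--     return new_puzzle
-- ===== SOURCE B (Python) =====
-- def reverse_right(puzzle):
--     n = len(puzzle)
--     cols = len(puzzle[0])
--     mid = cols // 2
--     return [puzzle[r][:mid + 1] + [puzzle[n - 1 - r][c] for c in range(mid + 1, cols)]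
--             for r in range(n)]
-- ===== Notes on version B (the rewrite author's own statement) =====
-- stated objective: simpler
-- what changed: B drops A's intermediate column-major right_columns buffer and its explicit column reversal, building each output row in one pass by reading the right-half cells directly from the vertically mirrored row puzzle[n-1-r].
import Mathlib
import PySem

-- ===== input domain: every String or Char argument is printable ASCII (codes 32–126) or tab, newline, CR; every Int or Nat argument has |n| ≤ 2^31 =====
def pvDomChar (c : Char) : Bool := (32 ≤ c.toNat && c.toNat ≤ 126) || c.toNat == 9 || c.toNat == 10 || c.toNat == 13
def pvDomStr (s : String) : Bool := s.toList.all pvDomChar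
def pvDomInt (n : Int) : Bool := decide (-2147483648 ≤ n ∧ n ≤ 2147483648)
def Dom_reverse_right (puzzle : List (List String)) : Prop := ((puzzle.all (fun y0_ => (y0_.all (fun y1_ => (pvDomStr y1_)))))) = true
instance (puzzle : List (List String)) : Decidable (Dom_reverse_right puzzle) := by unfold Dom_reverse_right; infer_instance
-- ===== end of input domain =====

-- B builds each row in one pass, reading right-half cells from the mirrored row puzzle[n-1-r]
-- instead of A's intermediate column-major buffer of reversed columns (objective: simpler).

-- ===== PORT A =====
-- literal port of A: build reversed right columns, then assemble rows from them.
def reverse_right (puzzle : List (List String)) : List (List String) :=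
  let numRows := puzzle.length
  let numCols := if numRows > 0 then (puzzle.headD []).length else 0
  let mid := numCols / 2
  let right_columns : List (List String) :=
    (List.range' (mid + 1) (numCols - (mid + 1))).map
      (fun col => (puzzle.map (fun row => row.getD col "")).reverse)
  (List.range numRows).map (fun r =>
    (puzzle.getD r []).take (mid + 1) ++
      (List.range (numCols - (mid + 1))).map
        (fun c => (right_columns.getD c []).getD r ""))

-- ===== PORT B =====
-- literal port of B: one pass over rows, mirrored-row indexing for the right half.
def reverse_right_alt (puzzle : List (List String)) : List (List String) :=
  let n := puzzle.length
  let cols := (puzzle.headD []).length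
  let mid := cols / 2
  (List.range n).map (fun r =>
    (puzzle.getD r []).take (mid + 1) ++
      (List.range' (mid + 1) (cols - (mid + 1))).map
        (fun c => (puzzle.getD (n - 1 - r) []).getD c ""))

-- ===== PRECONDITION & SPEC =====
-- Pre_ excludes exactly the inputs where the Python A raises IndexError: the empty grid
-- (puzzle[0]), and grids whose first row has more than two columns while some row is
-- shorter than it (the column loop then indexes every row up to that width).
def Pre_reverse_right (puzzle : List (List String)) : Prop :=
  puzzle ≠ [] ∧
    ((puzzle.headD []).length ≤ 2 ∨
      ∀ row ∈ puzzle, (puzzle.headD []).length ≤ row.length)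
instance (puzzle : List (List String)) : Decidable (Pre_reverse_right puzzle) := by
  unfold Pre_reverse_right; infer_instance
def pvWitness_reverse_right : List (List String) :=
  [["a", "b", "c", "d"], ["e", "f", "g", "h"], ["i", "j", "k", "l"]]
def Spec_reverse_right (puzzle : List (List String)) (out : List (List String)) : Prop := out = reverse_right_alt puzzle
instance (puzzle : List (List String)) (out : List (List String)) : Decidable (Spec_reverse_right puzzle out) := by unfold Spec_reverse_right; infer_instance

-- ===== CLAIM (what is proved, stated in full; the proofs are below) =====
def Claim_equal_reverse_right : Prop := ∀ (puzzle : List (List String)), Dom_reverse_right puzzle → Pre_reverse_right puzzle → Spec_reverse_right puzzle (reverse_right puzzle)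

-- ===== LEMMAS AND PROOFS =====

-- the reversed-right-columns cell A reads equals the mirrored-row cell B reads
theorem pv_cell_eq (puzzle : List (List String)) (mid k r c : ℕ)
    (hr : r < puzzle.length) (hc : c < k) :
    ((((List.range' (mid + 1) k).map
        (fun col => (puzzle.map (fun row => row.getD col "")).reverse)).getD c []).getD r "")
      = (puzzle.getD (puzzle.length - 1 - r) []).getD (mid + 1 + c) "" := by
  have hlen : c < ((List.range' (mid + 1) k).map
      (fun col => (puzzle.map (fun row => row.getD col "")).reverse)).length := by
    simpa using hc
  rw [List.getD_eq_getElem _ _ hlen, List.getElem_map, List.getElem_range']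
  simp only [Nat.one_mul]
  have hr' : r < ((puzzle.map (fun row => row.getD (mid + 1 + c) "")).reverse).length := by
    simpa using hr
  rw [List.getD_eq_getElem _ _ hr', List.getElem_reverse, List.getElem_map]
  have hm : puzzle.length - 1 - r < puzzle.length := by omega
  rw [List.getD_eq_getElem _ _ hm]
  simp

theorem pv_ports_eq (puzzle : List (List String)) :
    reverse_right puzzle = reverse_right_alt puzzle := by
  rcases puzzle with _ | ⟨h0, tl⟩
  · rfl
  · unfold reverse_right reverse_right_alt
    simp only [List.length_cons, List.headD_cons, Nat.succ_sub_one]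
    have hpos : 0 < tl.length + 1 := Nat.succ_pos _
    simp only [if_pos hpos]
    apply List.map_congr_left
    intro r hr
    have hr' : r < (h0 :: tl).length := by simpa using List.mem_range.mp hr
    congr 1
    conv_rhs => rw [List.range'_eq_map_range, List.map_map]
    apply List.map_congr_left
    intro c hc
    have hc' : c < h0.length - (h0.length / 2 + 1) := List.mem_range.mp hc
    simp only [Function.comp]
    rw [pv_cell_eq (h0 :: tl) (h0.length / 2) _ r c hr' hc']
    simp [Nat.add_comm]

-- ===== VERDICT (by name: the statement is the Claim_ definition above) =====
theorem reverse_right_spec : Claim_equal_reverse_right := by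
  intro puzzle _ _
  exact pv_ports_eq puzzle
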